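-- pv_equiv track=rewrite | github.com/furion-199/kingshot_ttg_planner | src/ttg/planner.py | _spread_plan
-- ===== SOURCE A (Python) =====
-- from typing import Iterable
--
-- def _canonicalize_plan(plan: Iterable[int], used_this_week: int) -> tuple[int, ...]:
--     vals = [int(x) for x in plan]
--     if not vals:
--         return tuple()
--
--     if used_this_week > 0:
--         return (vals[0],) + tuple(sorted(vals[1:], reverse=True))
--
--     return tuple(sorted(vals, reverse=True))
--
-- def _spread_plan(plan: tuple[int, ...], move: int, used_this_week: int) -> tuple[int, ...]:
--     vals = list(plan)
--     caps = [100 - used_this_week] + [100] * (len(vals) - 1)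
--
--     for i in range(len(vals)):
--         if vals[i] < move:
--             continue
--
--         for j in range(len(vals) - 1, -1, -1):
--             if i == j:
--                 continue
--             if vals[j] + move > caps[j]:
--                 continue
--
--             vals2 = vals.copy()
--             vals2[i] -= move
--             vals2[j] += move
--             return _canonicalize_plan(vals2, used_this_week)
--
--     return plan
-- ===== SOURCE B (Python) =====
-- def _spread_plan(plan, move, used_this_week):
--     # One pass computes the top-two valid target indices (largest and second
--     # largest j with vals[j] + move <= cap(j)); then a single scan finds the
--     # first source i, picking the second-best target when the best is i itself.
--     vals = list(plan)
--     n = len(vals)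
--     j1 = j2 = None
--     for j in range(n):
--         cap = 100 - used_this_week if j == 0 else 100
--         if vals[j] + move <= cap:
--             j2 = j1
--             j1 = j
--     for i in range(n):
--         if vals[i] < move:
--             continue
--         j = j1 if j1 != i else j2
--         if j is None:
--             continue
--         vals[i] -= move
--         vals[j] += move
--         if used_this_week > 0:
--             return (vals[0],) + tuple(sorted(vals[1:], reverse=True))
--         return tuple(sorted(vals, reverse=True))
--     return plan
-- ===== Notes on version B (the rewrite author's own statement) =====
-- stated objective: alternative
-- what changed: A rescans all target indices j from the right for every candidate source i (nested loops); B precomputes the top-two valid target indices in one pass and then finds the first valid source in a single scan (overall cost is dominated by the final sort in both).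
import Mathlib
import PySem

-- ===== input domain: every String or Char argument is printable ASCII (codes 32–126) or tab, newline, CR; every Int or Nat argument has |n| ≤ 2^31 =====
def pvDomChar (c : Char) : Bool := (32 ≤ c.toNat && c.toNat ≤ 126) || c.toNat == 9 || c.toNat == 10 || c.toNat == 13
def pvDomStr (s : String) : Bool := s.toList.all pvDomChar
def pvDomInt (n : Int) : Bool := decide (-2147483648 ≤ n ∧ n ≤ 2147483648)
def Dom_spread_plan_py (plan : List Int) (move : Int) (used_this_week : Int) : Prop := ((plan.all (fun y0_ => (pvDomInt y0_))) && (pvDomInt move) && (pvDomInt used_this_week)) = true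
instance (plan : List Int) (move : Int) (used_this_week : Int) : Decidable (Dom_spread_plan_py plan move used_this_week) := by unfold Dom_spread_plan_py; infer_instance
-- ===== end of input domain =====

-- B replaces A's nested scan (for each source i, re-scan all j from the right) by one pass that
-- precomputes the top-two valid target indices, then a single scan for the source: an alternative, structurally different algorithm.


-- ===== PORT A =====
-- _canonicalize_plan: keep vals[0] first when used_this_week > 0, rest sorted descending
def canonicalize_plan_py (vals : List Int) (used_this_week : Int) : List Int :=
  match vals with
  | [] => []
  | v :: rest =>
    if used_this_week > 0 then v :: PySem.List.sorted rest (fun x => x) true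
    else PySem.List.sorted (v :: rest) (fun x => x) true

-- inner loop of A: for j in range(len(vals)-1, -1, -1): first j ≠ i with vals[j] + move ≤ caps[j]
def spreadInnerA (vals caps : List Int) (move : Int) (i : Nat) : Option Nat :=
  (List.range vals.length).reverse.find?
    (fun j => (j != i) && decide (vals.getD j 0 + move ≤ caps.getD j 0))

def spread_plan_py (plan : List Int) (move : Int) (used_this_week : Int) : List Int :=
  let vals := plan
  let caps := (100 - used_this_week) :: List.replicate (vals.length - 1) 100
  match (List.range vals.length).find?
      (fun i => decide (move ≤ vals.getD i 0) && (spreadInnerA vals caps move i).isSome) with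
  | none => plan
  | some i =>
    match spreadInnerA vals caps move i with
    | none => plan
    | some j =>
      let v1 := vals.set i (vals.getD i 0 - move)
      let v2 := v1.set j (v1.getD j 0 + move)
      canonicalize_plan_py v2 used_this_week

-- ===== PORT B =====
-- one pass: (j1, j2) = top-two indices j (largest, second largest) with vals[j] + move ≤ cap j
def topTwoB (vals : List Int) (move : Int) (used_this_week : Int) : Option Nat × Option Nat :=
  (List.range vals.length).foldl
    (fun p j =>
      let cap : Int := if j = 0 then 100 - used_this_week else 100
      if vals.getD j 0 + move ≤ cap then (some j, p.1) else p)
    (none, none)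

def chooseB (tt : Option Nat × Option Nat) (i : Nat) : Option Nat :=
  if tt.1 != some i then tt.1 else tt.2

def spread_plan_py_alt (plan : List Int) (move : Int) (used_this_week : Int) : List Int :=
  let vals := plan
  let tt := topTwoB vals move used_this_week
  match (List.range vals.length).find?
      (fun i => decide (move ≤ vals.getD i 0) && (chooseB tt i).isSome) with
  | none => plan
  | some i =>
    match chooseB tt i with
    | none => plan
    | some j =>
      let v1 := vals.set i (vals.getD i 0 - move)
      let v2 := v1.set j (v1.getD j 0 + move)
      match v2 with
      | [] => []
      | v :: rest =>
        if used_this_week > 0 then v :: PySem.List.sorted rest (fun x => x) true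
        else PySem.List.sorted (v :: rest) (fun x => x) true

-- ===== PRECONDITION & SPEC =====
def Spec_spread_plan_py (plan : List Int) (move : Int) (used_this_week : Int) (out : List Int) : Prop := out = spread_plan_py_alt plan move used_this_week
instance (plan : List Int) (move : Int) (used_this_week : Int) (out : List Int) : Decidable (Spec_spread_plan_py plan move used_this_week out) := by unfold Spec_spread_plan_py; infer_instance

-- ===== CLAIM (what is proved, stated in full; the proofs are below) =====
def Claim_equal_spread_plan_py : Prop := ∀ (plan : List Int) (move : Int) (used_this_week : Int), Dom_spread_plan_py plan move used_this_week → Spec_spread_plan_py plan move used_this_week (spread_plan_py plan move used_this_week)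

-- ===== LEMMAS AND PROOFS =====

-- find? as the head of the filtered list (no library lemma by this name in this toolchain)
theorem find?_eq_head?_filter' (p : Nat → Bool) (l : List Nat) :
    l.find? p = (l.filter p).head? := by
  induction l with
  | nil => rfl
  | cons a t ih =>
    by_cases h : p a
    · rw [List.find?_cons_of_pos h, List.filter_cons_of_pos h, List.head?_cons]
    · rw [List.find?_cons_of_neg h, List.filter_cons_of_neg h, ih]

-- A's caps list agrees with B's cap formula on every in-range index
theorem caps_getD (used : Int) (n j : Nat) (hj : j < n) :
    ((100 - used) :: List.replicate (n - 1) (100 : Int)).getD j 0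
      = if j = 0 then 100 - used else 100 := by
  cases j with
  | zero => rfl
  | succ k =>
    simp only [List.getD_cons_succ, if_neg (Nat.succ_ne_zero k)]
    exact List.getD_replicate (100 : Int) (by omega)

-- B's fold computes the head and second element of the reversed filtered list
theorem foldl_top2 (q : Nat → Prop) [DecidablePred q] (l : List Nat) :
    l.foldl (fun (p : Option Nat × Option Nat) j => if q j then (some j, p.1) else p) (none, none)
      = ((l.filter (fun j => decide (q j))).reverse.head?,
         (l.filter (fun j => decide (q j))).reverse.tail.head?) := by
  induction l using List.reverseRecOn with
  | nil => rfl
  | append_singleton l a ih =>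
    rw [List.foldl_append, List.foldl_cons, List.foldl_nil, ih, List.filter_append]
    by_cases h : q a
    · simp [h]
    · simp [h]

-- dropping i from a duplicate-free list only matters at the head
theorem filter_ne_head (F : List Nat) (i : Nat) (h : F.Nodup) :
    (F.filter (fun j => j != i)).head?
      = if F.head? != some i then F.head? else F.tail.head? := by
  cases F with
  | nil => rfl
  | cons a t =>
    by_cases hai : a = i
    · subst hai
      have ht : t.filter (fun j => j != a) = t :=
        List.filter_eq_self.mpr (fun x hx => by
          simp only [bne_iff_ne, ne_eq]
          exact fun hxa => (List.nodup_cons.mp h).1 (hxa ▸ hx))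
      simp [ht]
    · simp [List.head?_cons, bne, hai]

-- A's inner right-to-left scan equals B's precomputed top-two choice, for every i
theorem inner_eq_choose (vals : List Int) (move used : Int) (i : Nat) :
    spreadInnerA vals ((100 - used) :: List.replicate (vals.length - 1) 100) move i
      = chooseB (topTwoB vals move used) i := by
  have hq : ∀ j ∈ (List.range vals.length).reverse,
      ((j != i) && decide (vals.getD j 0 + move ≤
        ((100 - used) :: List.replicate (vals.length - 1) (100 : Int)).getD j 0))
      = ((j != i) && decide (vals.getD j 0 + move ≤ if j = 0 then 100 - used else 100)) := by
    intro j hj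
    rw [caps_getD used vals.length j (List.mem_range.mp (List.mem_reverse.mp hj))]
  have hF : topTwoB vals move used
      = ((((List.range vals.length).filter
            (fun j => decide (vals.getD j 0 + move ≤ if j = 0 then 100 - used else 100))).reverse).head?,
         (((List.range vals.length).filter
            (fun j => decide (vals.getD j 0 + move ≤ if j = 0 then 100 - used else 100))).reverse).tail.head?) := by
    unfold topTwoB
    exact foldl_top2 (fun j => vals.getD j 0 + move ≤ if j = 0 then 100 - used else 100) _
  have hnd : ((((List.range vals.length).filter
      (fun j => decide (vals.getD j 0 + move ≤ if j = 0 then 100 - used else 100))).reverse)).Nodup :=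
    List.nodup_reverse.mpr (List.nodup_range.filter _)
  unfold spreadInnerA
  rw [find?_eq_head?_filter', List.filter_congr hq, ← List.filter_filter,
      List.filter_reverse, filter_ne_head _ i hnd, hF]
  rfl

-- ===== VERDICT (by name: the statement is the Claim_ definition above) =====
theorem spread_plan_py_spec : Claim_equal_spread_plan_py := by
  intro plan move used _
  unfold Spec_spread_plan_py spread_plan_py spread_plan_py_alt
  have h := inner_eq_choose plan move used
  simp only [h]
  cases hfind : (List.range plan.length).find?
      (fun i => decide (move ≤ plan.getD i 0) && (chooseB (topTwoB plan move used) i).isSome) with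
  | none => rfl
  | some i =>
    cases hch : chooseB (topTwoB plan move used) i with
    | none => rfl
    | some j =>
      unfold canonicalize_plan_py
      rfl
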